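-- pv_equiv track=rewrite | github.com/pypi-data/pypi-mirror-382 | packages/materialite/materialite-0.1.3-py3-none-any.whl/materialite/tensor.py | order_dims
-- ===== SOURCE A (Python) =====
-- def order_dims(left_dims=None, right_dims=None):
--     """
--     Combine two dimension iterables using left-is-always-right precedence.
--
--     The left dimensions maintain their exact order and act as "authorities"
--     that decide where new dimensions from the right should be placed.
--
--     Example: order_dims("ab", "bca") → "cab"
--     - Start with "ab"
--     - Authority 'a' sees 'c' comes before 'a' in "bca", so places 'c' before 'a'
--     """
--
--     # Handle edge cases: if either input is empty, return the other
--     if not right_dims: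
--         return left_dims
--     if not left_dims:
--         return right_dims
--
--     # Start with left dimensions as the foundation - they never reorder relatively
--     result = list(left_dims)
--
--     # List of right_dims that are not in left_dims
--     only_right_dims = [dim for dim in right_dims if dim not in left_dims]
--
--     # Add each new "only in right" dimension one at a time in order
--     for new_dim in only_right_dims:
--
--         # Default: place new dimension at the end if no authority has an opinion
--         insert_index = len(result)
--
--         # Ask each left dimension (authority) where this new dimension should go
--         # Authorities are consulted left-to-right (leftmost = highest rank)
--         # Only left_dims that also appear in right_dims can give opinions as authorities
--         # (they need context about the new dimension's index relatively)
--         authority_left_dims = [dim for dim in left_dims if dim in right_dims]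
--         for authority_dim in authority_left_dims:
--
--             authority_index = result.index(authority_dim)
--
--             if right_dims.index(new_dim) < right_dims.index(authority_dim):
--                 # Authority says: "This dimension comes before me in right_dims,
--                 # so place it directly before me in the intermediate result"
--                 insert_index = authority_index
--                 break  # Highest-ranking authority's "before" decision is final
--             else:
--                 # Authority says: "This dimension comes after me in right_dims,
--                 # so place it right after me (or further after if other authorities disagree)"
--                 insert_index = max(insert_index, authority_index + 1)
--                 # Continue asking other authorities - they might push it further right
--
--         # Place the new dimension at the determined index
--         result.insert(insert_index, new_dim)
--
--     return "".join(result)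
-- ===== SOURCE B (Python) =====
-- def order_dims(left_dims=None, right_dims=None):
--     # Single left-to-right pass: flush right-only dims below each authority's
--     # first right-index before the authority, instead of repeated list.insert.
--     if not right_dims:
--         return left_dims
--     if not left_dims:
--         return right_dims
--     rpos = {}
--     for i, d in enumerate(right_dims):
--         if d not in rpos:
--             rpos[d] = i
--     remaining = [d for d in right_dims if d not in left_dims]
--     out = []
--     for c in left_dims:
--         if c in rpos:  # c is an authority (appears in right_dims)
--             p = rpos[c]
--             out.extend(x for x in remaining if rpos[x] < p)
--             remaining = [x for x in remaining if rpos[x] >= p]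
--         out.append(c)
--     out.extend(remaining)
--     return "".join(out)
-- ===== Notes on version B (the rewrite author's own statement) =====
-- stated objective: alternative
-- what changed: A inserts each right-only dim one at a time, rescanning the authority list with repeated list.index calls and shifting with list.insert; B precomputes a dim->first-right-index map once and builds the result in a single left-to-right pass that flushes the pending right-only dims whose right index is below each authority's before that authority, appending the leftovers at the end.
import Mathlib
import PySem

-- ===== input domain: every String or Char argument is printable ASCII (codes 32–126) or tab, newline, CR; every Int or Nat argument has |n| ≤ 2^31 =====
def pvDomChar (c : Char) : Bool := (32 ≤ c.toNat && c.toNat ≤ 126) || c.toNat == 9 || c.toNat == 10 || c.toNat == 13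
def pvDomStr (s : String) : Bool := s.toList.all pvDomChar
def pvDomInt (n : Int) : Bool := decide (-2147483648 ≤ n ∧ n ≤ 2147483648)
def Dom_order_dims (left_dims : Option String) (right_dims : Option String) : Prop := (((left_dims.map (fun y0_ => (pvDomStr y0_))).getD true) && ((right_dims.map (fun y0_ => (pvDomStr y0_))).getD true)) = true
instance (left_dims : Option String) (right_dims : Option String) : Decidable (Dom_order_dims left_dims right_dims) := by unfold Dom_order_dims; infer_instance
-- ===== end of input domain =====

-- B replaces A's insert-one-dim-at-a-time loop (repeated list.index scans and
-- list.insert shifts) by one left-to-right pass that flushes the pending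
-- right-only dims before each authority; same return value everywhere.

-- ===== PORT A =====
-- right_dims.index(c) / result.index(c): at every call site of A the element is
-- a member, so the unreachable ValueError case is defaulted to 0.
def aRIdx (R : List Char) (c : Char) : Nat := (PySem.List.index? R c).getD 0

-- inner 'for authority_dim in authority_left_dims' loop with its break;
-- acc is insert_index (initially len(result))
def aFindIdx (result R : List Char) (newDim : Char) : List Char → Nat → Nat
  | [], acc => acc
  | a :: rest, acc =>
    let ai := (PySem.List.index? result a).getD 0
    if aRIdx R newDim < aRIdx R a then ai
    else aFindIdx result R newDim rest (max acc (ai + 1))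

-- the combined path of A: result = list(left), insert each only-right dim
def aCore (L R : List Char) : List Char :=
  (R.filter (fun d => !L.contains d)).foldl
    (fun result newDim =>
      PySem.List.insert result
        ((aFindIdx result R newDim (L.filter (fun d => R.contains d)) result.length : Nat) : Int)
        newDim)
    L

def order_dims (left_dims : Option String) (right_dims : Option String) : Option String :=
  match right_dims with
  | none => left_dims
  | some rs =>
    if rs.toList = [] then left_dims
    else
      match left_dims with
      | none => some rs
      | some ls =>
        if ls.toList = [] then some rs
        else some (String.ofList (aCore ls.toList rs.toList))

-- ===== PORT B =====
-- rpos = {} ; for i, d in enumerate(right_dims): if d not in rpos: rpos[d] = i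
def bRpos (R : List Char) : PySem.Dict Char Int :=
  (PySem.List.enumerate R).foldl
    (fun d p => if d.contains p.2 then d else d.insert p.2 p.1) PySem.Dict.empty

-- rpos[x]: every x looked up is in right_dims, so the KeyError default 0 is unreachable
def bCore (L R : List Char) : List Char :=
  let rpos := bRpos R
  let st := L.foldl
    (fun (st : List Char × List Char) c =>
      let st' :=
        if rpos.contains c then
          let p := rpos.getD c 0
          (st.1 ++ st.2.filter (fun x => rpos.getD x 0 < p),
           st.2.filter (fun x => rpos.getD x 0 ≥ p))
        else st
      (st'.1 ++ [c], st'.2))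
    ([], R.filter (fun d => !L.contains d))
  st.1 ++ st.2

def order_dims_alt (left_dims : Option String) (right_dims : Option String) : Option String :=
  match right_dims with
  | none => left_dims
  | some rs =>
    if rs.toList = [] then left_dims
    else
      match left_dims with
      | none => some rs
      | some ls =>
        if ls.toList = [] then some rs
        else some (String.ofList (bCore ls.toList rs.toList))

-- ===== PRECONDITION & SPEC =====
def Spec_order_dims (left_dims : Option String) (right_dims : Option String) (out : Option String) : Prop := out = order_dims_alt left_dims right_dims
instance (left_dims : Option String) (right_dims : Option String) (out : Option String) : Decidable (Spec_order_dims left_dims right_dims out) := by unfold Spec_order_dims; infer_instance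

-- ===== CLAIM (what is proved, stated in full; the proofs are below) =====
def Claim_equal_order_dims : Prop := ∀ (left_dims : Option String) (right_dims : Option String), Dom_order_dims left_dims right_dims → Spec_order_dims left_dims right_dims (order_dims left_dims right_dims)

-- ===== LEMMAS AND PROOFS =====

-- proof-side canonical recursion both cores are reduced to:
-- walk L, flushing pending right-only dims whose first right-index is below
-- the authority's before the authority
def pvGo (R : List Char) : List Char → List Char → List Char
  | [], rem => rem
  | c :: L', rem =>
    if c ∈ R then
      rem.filter (fun x => decide (R.idxOf x < R.idxOf c)) ++
        c :: pvGo R L' (rem.filter (fun x => !decide (R.idxOf x < R.idxOf c)))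
    else c :: pvGo R L' rem

-- proof-side insertion (list.insert at an in-range nonnegative index)
def pvIns (xs : List Char) (n : Nat) (d : Char) : List Char := xs.take n ++ d :: xs.drop n

-- proof-side clean form of A's inner loop: scan L, first authority a with
-- r d < r a decides idxOf a in res; default len res
def pvAIdx (R res : List Char) (d : Char) : List Char → Nat
  | [] => res.length
  | a :: rest => if a ∈ R ∧ R.idxOf d < R.idxOf a then res.idxOf a else pvAIdx R res d rest

lemma index?_getD_of_mem (xs : List Char) (v : Char) (h : v ∈ xs) :
    (PySem.List.index? xs v).getD 0 = xs.idxOf v := by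
  induction xs with
  | nil => simp at h
  | cons x xs ih =>
    by_cases hv : x = v
    · subst hv; rw [PySem.List.index?_cons_self]; simp [List.idxOf_cons_self]
    · rw [PySem.List.index?_cons_of_ne xs hv]
      rcases List.mem_cons.mp h with h' | h'
      · exact absurd h'.symm hv
      · obtain ⟨k, hk⟩ := Option.isSome_iff_exists.mp ((PySem.List.index?_isSome_iff xs v).mpr h')
        rw [hk]
        simp only [Option.map_some, Option.getD_some]
        rw [List.idxOf_cons_ne _ hv, ← ih h', hk]
        rfl

-- A's inner loop over the authority filter, started at acc = len(result),
-- equals the clean scan of L itself (the 'else' branch's max never moves acc)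
lemma aFindIdx_filter_eq (R res : List Char) (d : Char) (hd : d ∈ R) :
    ∀ (L : List Char), (∀ a ∈ L, a ∈ res) →
      aFindIdx res R d (L.filter (fun a => R.contains a)) res.length = pvAIdx R res d L := by
  intro L
  induction L with
  | nil => intro _; simp [aFindIdx, pvAIdx]
  | cons a L' ih =>
    intro hres
    have ha : a ∈ res := hres a (List.mem_cons_self)
    have hres' : ∀ x ∈ L', x ∈ res := fun x hx => hres x (List.mem_cons_of_mem _ hx)
    by_cases haR : a ∈ R
    · have hc : R.contains a = true := by simpa using haR
      simp only [List.filter_cons, hc, if_pos]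
      show (if aRIdx R d < aRIdx R a then (PySem.List.index? res a).getD 0
            else aFindIdx res R d (L'.filter (fun x => R.contains x))
              (max res.length ((PySem.List.index? res a).getD 0 + 1))) = _
      rw [aRIdx, aRIdx, index?_getD_of_mem R d hd, index?_getD_of_mem R a haR,
        index?_getD_of_mem res a ha]
      have hlt : res.idxOf a < res.length := List.idxOf_lt_length_of_mem ha
      have hmax : max res.length (res.idxOf a + 1) = res.length := by omega
      rw [hmax]
      show _ = pvAIdx R res d (a :: L')
      unfold pvAIdx
      by_cases hcond : R.idxOf d < R.idxOf a
      · simp [hcond, haR]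
      · simp only [hcond, ite_false, haR, true_and]
        exact ih hres'
    · have hc : R.contains a = false := by simpa using haR
      simp only [List.filter_cons, hc]
      show _ = pvAIdx R res d (a :: L')
      unfold pvAIdx
      simp only [haR, false_and, ite_false]
      exact ih hres'

lemma mem_pvGo_left (R : List Char) (c : Char) :
    ∀ (L rem : List Char), c ∈ L → c ∈ pvGo R L rem := by
  intro L
  induction L with
  | nil => intro rem h; simp at h
  | cons a L' ih =>
    intro rem h
    unfold pvGo
    rcases List.mem_cons.mp h with h' | h'
    · subst h'; by_cases haR : c ∈ R <;> simp [haR]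
    · by_cases haR : a ∈ R <;> simp [haR, ih _ h']

lemma pvAIdx_le (R res : List Char) (d : Char) :
    ∀ (L : List Char), (∀ a ∈ L, a ∈ res) → pvAIdx R res d L ≤ res.length := by
  intro L
  induction L with
  | nil => intro _; simp [pvAIdx]
  | cons a L' ih =>
    intro hres
    unfold pvAIdx
    split_ifs with h
    · exact le_of_lt (List.idxOf_lt_length_of_mem (hres a List.mem_cons_self))
    · exact ih (fun x hx => hres x (List.mem_cons_of_mem _ hx))

-- pvIns and pvAIdx pass through a 'flush ++ authority ::' prefix
lemma pvIns_shift (flush X' : List Char) (c d : Char) (n : Nat) :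
    pvIns (flush ++ c :: X') (flush.length + 1 + n) d = flush ++ c :: pvIns X' n d := by
  have h : flush ++ c :: X' = (flush ++ [c]) ++ X' := by simp
  have hl : flush.length + 1 + n = (flush ++ [c]).length + n := by simp
  rw [pvIns, h, hl, List.take_length_add_append, List.drop_length_add_append]
  simp [pvIns]

lemma pvIns_at_left (flush l : List Char) (d : Char) :
    pvIns (flush ++ l) flush.length d = flush ++ d :: l := by
  have hl : flush.length = flush.length + 0 := by omega
  rw [pvIns, hl, List.take_length_add_append, List.drop_length_add_append]
  simp

lemma pvAIdx_shift (R : List Char) (d c : Char) (flush X' : List Char)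
    (hc : ¬(c ∈ R ∧ R.idxOf d < R.idxOf c)) :
    ∀ L' : List Char, (∀ x ∈ flush, x ∉ L') →
      pvAIdx R (flush ++ c :: X') d L' = flush.length + 1 + pvAIdx R X' d L' := by
  intro L'
  induction L' with
  | nil => intro _; simp [pvAIdx]; omega
  | cons a rest ih =>
    intro hflush
    unfold pvAIdx
    split_ifs with h
    · have hac : a ≠ c := by
        rintro rfl; exact hc h
      have haf : a ∉ flush := fun hx => hflush a hx List.mem_cons_self
      rw [List.idxOf_append_of_notMem haf, List.idxOf_cons_ne _ (Ne.symm hac)]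
      omega
    · exact ih (fun x hx => fun hm => hflush x hx (List.mem_cons_of_mem _ hm))

-- KEY STEP: appending one more right-only dim to the pending list is the same
-- as inserting it at A's index into the already-merged result
lemma pvGo_snoc (R : List Char) (d : Char) :
    ∀ (L rem : List Char), d ∉ L → (∀ x ∈ rem, x ∈ R ∧ x ∉ L) →
      pvGo R L (rem ++ [d]) =
        pvIns (pvGo R L rem) (pvAIdx R (pvGo R L rem) d L) d := by
  intro L
  induction L with
  | nil =>
    intro rem _ _
    simp [pvGo, pvAIdx, pvIns]
  | cons c L' ih =>
    intro rem hdL hrem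
    have hdc : d ≠ c := fun h => hdL (h ▸ List.mem_cons_self)
    have hdL' : d ∉ L' := fun h => hdL (List.mem_cons_of_mem _ h)
    by_cases hcR : c ∈ R
    · -- authority head
      unfold pvGo
      simp only [hcR, if_pos, List.filter_append]
      set P : Char → Bool := fun x => decide (R.idxOf x < R.idxOf c) with hP
      set flush := rem.filter P with hflush
      set keep := rem.filter (fun x => !P x) with hkeep
      have hfsub : ∀ x ∈ flush, x ∈ R ∧ x ∉ (c :: L') := fun x hx => hrem x (List.mem_of_mem_filter hx)
      have hksub : ∀ x ∈ keep, x ∈ R ∧ x ∉ L' :=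
        fun x hx => ⟨(hrem x (List.mem_of_mem_filter hx)).1,
          fun hm => (hrem x (List.mem_of_mem_filter hx)).2 (List.mem_cons_of_mem _ hm)⟩
      by_cases hcd : R.idxOf d < R.idxOf c
      · -- d is flushed right before c
        have h1 : [d].filter P = [d] := by simp [hP, hcd]
        have h2 : [d].filter (fun x => !P x) = [] := by simp [hP, hcd]
        rw [h1, h2, List.append_nil]
        -- RHS index: pvAIdx picks c, whose idxOf is flush.length
        show flush ++ [d] ++ c :: pvGo R L' keep
            = pvIns (flush ++ c :: pvGo R L' keep) (pvAIdx R (flush ++ c :: pvGo R L' keep) d (c :: L')) d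
        have hcnot : c ∉ flush := fun hx => (hfsub c hx).2 List.mem_cons_self
        unfold pvAIdx
        simp only [hcR, hcd, and_self, if_pos]
        rw [List.idxOf_append_of_notMem hcnot, List.idxOf_cons_self]
        rw [Nat.add_zero, pvIns_at_left]
        simp
      · -- d stays pending; recurse
        have h1 : [d].filter P = [] := by simp [hP, hcd]
        have h2 : [d].filter (fun x => !P x) = [d] := by simp [hP, hcd]
        rw [h1, h2, List.append_nil]
        show flush ++ c :: pvGo R L' (keep ++ [d])
            = pvIns (flush ++ c :: pvGo R L' keep) (pvAIdx R (flush ++ c :: pvGo R L' keep) d (c :: L')) d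
        rw [ih keep hdL' hksub]
        have hcnd : ¬(c ∈ R ∧ R.idxOf d < R.idxOf c) := fun h => hcd h.2
        have hfl' : ∀ x ∈ flush, x ∉ L' := fun x hx => fun hm => (hfsub x hx).2 (List.mem_cons_of_mem _ hm)
        have hcons : pvAIdx R (flush ++ c :: pvGo R L' keep) d (c :: L')
            = pvAIdx R (flush ++ c :: pvGo R L' keep) d L' := by
          simp only [pvAIdx]; simp [hcnd]
        have hstep := hcons.trans (pvAIdx_shift R d c flush _ hcnd L' hfl')
        rw [hstep, pvIns_shift]
    · -- non-authority head
      unfold pvGo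
      simp only [hcR, ite_false]
      have hrem' : ∀ x ∈ rem, x ∈ R ∧ x ∉ L' :=
        fun x hx => ⟨(hrem x hx).1, fun hm => (hrem x hx).2 (List.mem_cons_of_mem _ hm)⟩
      rw [ih rem hdL' hrem']
      have hcnd : ¬(c ∈ R ∧ R.idxOf d < R.idxOf c) := fun h => hcR h.1
      have hcons : pvAIdx R (c :: pvGo R L' rem) d (c :: L')
          = pvAIdx R (c :: pvGo R L' rem) d L' := by
        simp only [pvAIdx]; simp [hcnd]
      have hshift := pvAIdx_shift R d c [] (pvGo R L' rem) hcnd L' (by simp)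
      simp only [List.nil_append, List.length_nil] at hshift
      have hstep := hcons.trans hshift
      have h2 := pvIns_shift [] (pvGo R L' rem) c d (pvAIdx R (pvGo R L' rem) d L')
      simp only [List.nil_append, List.length_nil] at h2
      show c :: pvIns (pvGo R L' rem) (pvAIdx R (pvGo R L' rem) d L') d
          = pvIns (c :: pvGo R L' rem) (pvAIdx R (c :: pvGo R L' rem) d (c :: L')) d
      rw [hstep, h2]

lemma pvGo_nil_rem (R : List Char) : ∀ L : List Char, pvGo R L [] = L := by
  intro L
  induction L with
  | nil => rfl
  | cons c L' ih => unfold pvGo; by_cases hcR : c ∈ R <;> simp [hcR, ih]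

-- A's outer loop computes pvGo
lemma aCore_eq_pvGo (L R : List Char) :
    aCore L R = pvGo R L (R.filter (fun d => !L.contains d)) := by
  have aux : ∀ Q : List Char, (∀ x ∈ Q, x ∈ R ∧ x ∉ L) →
      Q.foldl (fun result newDim =>
        PySem.List.insert result
          ((aFindIdx result R newDim (L.filter (fun d => R.contains d)) result.length : Nat) : Int)
          newDim) L = pvGo R L Q := by
    intro Q
    induction Q using List.reverseRecOn with
    | nil => intro _; simp [pvGo_nil_rem]
    | append_singleton Q d ih =>
      intro h
      have hd := h d (by simp)
      have hQ : ∀ x ∈ Q, x ∈ R ∧ x ∉ L := fun x hx => h x (List.mem_append_left _ hx)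
      rw [List.foldl_append, List.foldl_cons, List.foldl_nil, ih hQ]
      have hresmem : ∀ a ∈ L, a ∈ pvGo R L Q := fun a ha => mem_pvGo_left R a L Q ha
      rw [aFindIdx_filter_eq R (pvGo R L Q) d hd.1 L hresmem]
      rw [pvGo_snoc R d L Q hd.2 hQ]
      rw [PySem.List.insert_natCast _ _ _ (pvAIdx_le R (pvGo R L Q) d L hresmem)]
      rfl
  have hO : ∀ x ∈ R.filter (fun d => !L.contains d), x ∈ R ∧ x ∉ L := by
    intro x hx
    have := List.mem_filter.mp hx
    exact ⟨this.1, by simpa using this.2⟩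
  exact aux _ hO

-- the setdefault-style fold building rpos: present keys are preserved, …
lemma bRposAux_get?_of_contains (c : Char) :
    ∀ (Rl : List Char) (s : Int) (dct : PySem.Dict Char Int), dct.contains c = true →
      ((PySem.List.enumerate Rl s).foldl
        (fun d p => if d.contains p.2 then d else d.insert p.2 p.1) dct).get? c = dct.get? c := by
  intro Rl
  induction Rl with
  | nil => intro s dct _; simp [PySem.List.enumerate_nil]
  | cons x Rl' ih =>
    intro s dct hc
    rw [PySem.List.enumerate_cons, List.foldl_cons]
    by_cases hx : dct.contains x
    · simp only [hx, if_pos]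
      exact ih (s + 1) dct hc
    · simp only [hx, Bool.false_eq_true, ite_false]
      have hxc : x ≠ c := fun h => hx (h ▸ hc)
      rw [ih (s + 1) _ (by rw [PySem.Dict.contains_insert]; simp [hc])]
      exact PySem.Dict.get?_insert_of_ne _ _ (Ne.symm hxc)

-- …and a missing key c ∈ Rl gets the index of its first occurrence
lemma bRposAux_get?_of_mem (c : Char) :
    ∀ (Rl : List Char) (s : Int) (dct : PySem.Dict Char Int), c ∈ Rl → dct.contains c = false →
      ((PySem.List.enumerate Rl s).foldl
        (fun d p => if d.contains p.2 then d else d.insert p.2 p.1) dct).get? c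
        = some (s + (Rl.idxOf c : Int)) := by
  intro Rl
  induction Rl with
  | nil => intro s dct h _; simp at h
  | cons x Rl' ih =>
    intro s dct hmem hc
    rw [PySem.List.enumerate_cons, List.foldl_cons]
    by_cases hxc : x = c
    · subst hxc
      simp only [hc, Bool.false_eq_true, ite_false]
      rw [bRposAux_get?_of_contains x Rl' (s + 1) _
        (by rw [PySem.Dict.contains_insert]; simp)]
      rw [PySem.Dict.get?_insert_self, List.idxOf_cons_self]
      simp
    · have hmem' : c ∈ Rl' := by
        rcases List.mem_cons.mp hmem with h | h
        · exact absurd h.symm hxc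
        · exact h
      have hidx : (x :: Rl').idxOf c = Rl'.idxOf c + 1 := List.idxOf_cons_ne _ hxc
      by_cases hx : dct.contains x
      · simp only [hx, if_pos]
        rw [ih (s + 1) dct hmem' hc, hidx]
        push_cast; ring_nf
      · simp only [hx, Bool.false_eq_true, ite_false]
        rw [ih (s + 1) _ hmem' (by rw [PySem.Dict.contains_insert]; simp [hc, Ne.symm hxc]), hidx]
        push_cast; ring_nf

lemma bRpos_get?_of_mem (R : List Char) (c : Char) (h : c ∈ R) :
    (bRpos R).get? c = some ((R.idxOf c : Int)) := by
  rw [bRpos, bRposAux_get?_of_mem c R 0 PySem.Dict.empty h (PySem.Dict.contains_empty c)]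
  simp

lemma bRpos_getD_of_mem (R : List Char) (c : Char) (h : c ∈ R) :
    (bRpos R).getD c 0 = ((R.idxOf c : Int)) := by
  rw [PySem.Dict.getD_eq_get?_getD, bRpos_get?_of_mem R c h]; rfl

lemma bRposAux_contains (c : Char) :
    ∀ (Rl : List Char) (s : Int) (dct : PySem.Dict Char Int),
      ((PySem.List.enumerate Rl s).foldl
        (fun d p => if d.contains p.2 then d else d.insert p.2 p.1) dct).contains c
        = (dct.contains c || decide (c ∈ Rl)) := by
  intro Rl
  induction Rl with
  | nil => intro s dct; simp [PySem.List.enumerate_nil]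
  | cons x Rl' ih =>
    intro s dct
    rw [PySem.List.enumerate_cons, List.foldl_cons]
    by_cases hx : dct.contains x
    · simp only [hx, if_pos, ih]
      by_cases hxc : c = x
      · subst hxc; simp [hx]
      · simp [hxc]
    · simp only [hx, Bool.false_eq_true, ite_false, ih]
      rw [PySem.Dict.contains_insert]
      by_cases hxc : c = x
      · subst hxc; simp
      · have hbeq : (c == x) = false := by simpa using hxc
        simp [hbeq, hxc]

lemma bRpos_contains (R : List Char) (c : Char) :
    (bRpos R).contains c = decide (c ∈ R) := by
  rw [bRpos, bRposAux_contains c R 0 PySem.Dict.empty, PySem.Dict.contains_empty]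
  simp

-- B's left-to-right loop computes pvGo
lemma bLoop (R : List Char) :
    ∀ (Lp out rem : List Char), (∀ x ∈ rem, x ∈ R) →
      (Lp.foldl (fun (st : List Char × List Char) c =>
        let st' :=
          if (bRpos R).contains c then
            (st.1 ++ st.2.filter (fun x => (bRpos R).getD x 0 < (bRpos R).getD c 0),
             st.2.filter (fun x => (bRpos R).getD x 0 ≥ (bRpos R).getD c 0))
          else st
        (st'.1 ++ [c], st'.2)) (out, rem)).1
      ++ (Lp.foldl (fun (st : List Char × List Char) c =>
        let st' :=
          if (bRpos R).contains c then
            (st.1 ++ st.2.filter (fun x => (bRpos R).getD x 0 < (bRpos R).getD c 0),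
             st.2.filter (fun x => (bRpos R).getD x 0 ≥ (bRpos R).getD c 0))
          else st
        (st'.1 ++ [c], st'.2)) (out, rem)).2
      = out ++ pvGo R Lp rem := by
  intro Lp
  induction Lp with
  | nil => intro out rem _; simp [pvGo]
  | cons c Lp' ih =>
    intro out rem hrem
    rw [List.foldl_cons]
    by_cases hcR : c ∈ R
    · have hcont : (bRpos R).contains c = true := by rw [bRpos_contains]; simpa
      simp only [hcont, if_pos]
      have hf1 : rem.filter (fun x => (bRpos R).getD x 0 < (bRpos R).getD c 0)
          = rem.filter (fun x => decide (R.idxOf x < R.idxOf c)) := by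
        apply List.filter_congr
        intro x hx
        rw [bRpos_getD_of_mem R x (hrem x hx), bRpos_getD_of_mem R c hcR]
        simp
      have hf2 : rem.filter (fun x => (bRpos R).getD x 0 ≥ (bRpos R).getD c 0)
          = rem.filter (fun x => !decide (R.idxOf x < R.idxOf c)) := by
        apply List.filter_congr
        intro x hx
        rw [bRpos_getD_of_mem R x (hrem x hx), bRpos_getD_of_mem R c hcR]
        simp [← decide_not]
      simp only [hf1, hf2]
      have hrem' : ∀ x ∈ rem.filter (fun x => !decide (R.idxOf x < R.idxOf c)), x ∈ R :=
        fun x hx => hrem x (List.mem_of_mem_filter hx)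
      rw [ih (out ++ rem.filter (fun x => decide (R.idxOf x < R.idxOf c)) ++ [c]) _ hrem']
      conv_rhs => rw [pvGo]
      simp [hcR]
    · have hcont : (bRpos R).contains c = false := by rw [bRpos_contains]; simpa
      simp only [hcont, Bool.false_eq_true, ite_false]
      rw [ih (out ++ [c]) rem hrem]
      conv_rhs => rw [pvGo]
      simp [hcR]

-- B's loop computes pvGo
lemma bCore_eq_pvGo (L R : List Char) :
    bCore L R = pvGo R L (R.filter (fun d => !L.contains d)) := by
  have h := bLoop R L [] (R.filter (fun d => !L.contains d))
    (fun x hx => (List.mem_filter.mp hx).1)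
  rw [bCore]
  simpa using h

lemma aCore_eq_bCore (L R : List Char) : aCore L R = bCore L R := by
  rw [aCore_eq_pvGo, bCore_eq_pvGo]

-- ===== VERDICT (by name: the statement is the Claim_ definition above) =====
theorem order_dims_spec : Claim_equal_order_dims := by
  intro l r _
  unfold Spec_order_dims order_dims order_dims_alt
  cases r with
  | none => rfl
  | some rs =>
    cases l with
    | none => simp
    | some ls => simp [aCore_eq_bCore]
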